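-- pv_equiv track=rewrite | github.com/pypi-data/pypi-mirror-399 | packages/toon_serializer/toon_serializer-1.0.0.tar.gz/toon_serializer-1.0.0/src/toon_serializer/encoder.py | _is_uniform_dict_list
-- ===== SOURCE A (Python) =====
-- from typing import Any
--
-- def _is_uniform_dict_list(lst: list[Any]) -> bool:
--     """Check if list contains only dicts with identical keys."""
--     if not lst or not isinstance(lst[0], dict):
--         return False
--     first_keys = set(lst[0].keys())
--     for item in lst[1:]:
--         if not isinstance(item, dict) or set(item.keys()) != first_keys:
--             return False
--     return True
-- ===== SOURCE B (Python) =====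
-- def _is_uniform_dict_list(lst):
--     """Check if list contains only dicts with identical keys."""
--     if not lst:
--         return False
--     if not all(isinstance(item, dict) for item in lst):
--         return False
--     sigs = {frozenset(item.keys()) for item in lst}
--     return len(sigs) == 1
-- ===== Notes on version B (the rewrite author's own statement) =====
-- stated objective: alternative
-- what changed: Instead of fixing the first element's key-set and comparing each later element against it with early exit, B guards the degenerate cases up front and then collects the distinct frozenset key-signatures of all elements into a set, returning whether that set has exactly one member.
import Mathlib
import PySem

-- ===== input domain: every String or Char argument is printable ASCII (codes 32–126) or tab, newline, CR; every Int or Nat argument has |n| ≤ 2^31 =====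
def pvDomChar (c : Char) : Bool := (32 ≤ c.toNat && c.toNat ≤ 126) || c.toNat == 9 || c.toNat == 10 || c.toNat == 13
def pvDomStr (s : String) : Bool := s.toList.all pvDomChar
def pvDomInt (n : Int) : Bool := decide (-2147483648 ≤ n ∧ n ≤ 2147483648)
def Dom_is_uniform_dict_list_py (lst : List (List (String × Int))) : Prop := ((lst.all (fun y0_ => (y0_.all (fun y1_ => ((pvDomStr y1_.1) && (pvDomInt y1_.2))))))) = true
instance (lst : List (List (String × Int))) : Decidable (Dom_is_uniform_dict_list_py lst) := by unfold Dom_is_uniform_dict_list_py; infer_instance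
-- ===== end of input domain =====

-- B replaces A's compare-each-to-the-first loop by collecting the distinct key-signatures
-- into a set and checking its cardinality; same behaviour, alternative decomposition.


-- ===== PORT A =====
-- set(item.keys()) : the set of a dict's keys
def pvSig (item : List (String × Int)) : PySem.Set String :=
  PySem.Set.ofList (item.map Prod.fst)

-- 'for item in lst[1:]: if … set(item.keys()) != first_keys: return False' / final 'return True'
-- (the 'isinstance(item, dict)' test is always true on the typed domain list[dict[str,int]])
def pvALoop (firstKeys : PySem.Set String) : List (List (String × Int)) → Bool
  | [] => true
  | item :: rest =>
    if !(PySem.Set.equal (pvSig item) firstKeys) then false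
    else pvALoop firstKeys rest

def is_uniform_dict_list_py (lst : List (List (String × Int))) : Bool :=
  match lst with
  | [] => false            -- 'if not lst … return False' ('not isinstance(lst[0], dict)' never fires on the typed domain)
  | first :: rest => pvALoop (pvSig first) rest

-- ===== PORT B =====
-- Python's set-of-frozensets: membership uses frozenset '==' (extensional), so the
-- insertion step is ported by hand with PySem.Set.equal as the membership test (exact there).
def pvAddSig (acc : List (PySem.Set String)) (s : PySem.Set String) : List (PySem.Set String) :=
  if acc.any (fun t => PySem.Set.equal t s) then acc else acc ++ [s]

def is_uniform_dict_list_py_alt (lst : List (List (String × Int))) : Bool :=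
  match lst with
  | [] => false            -- 'if not lst: return False'  ('all(isinstance(…))' is always true on the typed domain)
  | _ =>
    -- sigs = {frozenset(item.keys()) for item in lst}; return len(sigs) == 1
    ((lst.foldl (fun acc item => pvAddSig acc (pvSig item)) []).length == 1)

-- ===== PRECONDITION & SPEC =====
def Spec_is_uniform_dict_list_py (lst : List (List (String × Int))) (out : Bool) : Prop := out = is_uniform_dict_list_py_alt lst
instance (lst : List (List (String × Int))) (out : Bool) : Decidable (Spec_is_uniform_dict_list_py lst out) := by unfold Spec_is_uniform_dict_list_py; infer_instance

-- ===== CLAIM (what is proved, stated in full; the proofs are below) =====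
def Claim_equal_is_uniform_dict_list_py : Prop := ∀ (lst : List (List (String × Int))), Dom_is_uniform_dict_list_py lst → Spec_is_uniform_dict_list_py lst (is_uniform_dict_list_py lst)

-- ===== LEMMAS AND PROOFS =====

theorem pvSetEqual_comm (s t : PySem.Set String) :
    PySem.Set.equal s t = PySem.Set.equal t s := by
  by_cases h : PySem.Set.equal t s = true
  · rw [h, (PySem.Set.equal_iff s t).2 fun x => ((PySem.Set.equal_iff t s).1 h x).symm]
  · by_cases h1 : PySem.Set.equal s t = true
    · exact absurd ((PySem.Set.equal_iff t s).2 fun x => ((PySem.Set.equal_iff s t).1 h1 x).symm) h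
    · rw [Bool.not_eq_true] at h h1; rw [h, h1]

theorem pvAddSig_len_le (acc : List (PySem.Set String)) (s : PySem.Set String) :
    acc.length ≤ (pvAddSig acc s).length := by
  unfold pvAddSig; split_ifs <;> simp

theorem pvFold_len_le (ss : List (List (String × Int))) (acc : List (PySem.Set String)) :
    acc.length ≤ (ss.foldl (fun acc item => pvAddSig acc (pvSig item)) acc).length := by
  induction ss generalizing acc with
  | nil => simp
  | cons s rest ih =>
      simpa using le_trans (pvAddSig_len_le acc (pvSig s)) (ih _)

-- the heart: starting from one signature, the set stays a singleton iff every later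
-- signature equals it
theorem pvFold_singleton (ss : List (List (String × Int))) (s0 : PySem.Set String) :
    ((ss.foldl (fun acc item => pvAddSig acc (pvSig item)) [s0]).length == 1)
      = ss.all (fun item => PySem.Set.equal (pvSig item) s0) := by
  induction ss with
  | nil => simp
  | cons item rest ih =>
      by_cases h : PySem.Set.equal s0 (pvSig item) = true
      · have heq : pvAddSig [s0] (pvSig item) = [s0] := by
          unfold pvAddSig; simp [h]
        simp [List.all_cons, heq, ih, pvSetEqual_comm (pvSig item) s0, h]
      · rw [Bool.not_eq_true] at h
        have heq : pvAddSig [s0] (pvSig item) = [s0, pvSig item] := by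
          unfold pvAddSig; simp [h]
        have hlen := pvFold_len_le rest [s0, pvSig item]
        simp only [List.foldl_cons, heq]
        have : ((rest.foldl (fun acc item => pvAddSig acc (pvSig item)) [s0, pvSig item]).length == 1) = false := by
          simp only [List.length_cons, List.length_nil] at hlen
          rw [beq_eq_false_iff_ne]
          omega
        simp [this, List.all_cons, pvSetEqual_comm (pvSig item) s0, h]

theorem pvALoop_eq_all (firstKeys : PySem.Set String) (rest : List (List (String × Int))) :
    pvALoop firstKeys rest = rest.all (fun item => PySem.Set.equal (pvSig item) firstKeys) := by
  induction rest with
  | nil => rfl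
  | cons item r ih =>
      unfold pvALoop
      by_cases h : PySem.Set.equal (pvSig item) firstKeys = true <;> simp [h, ih]

-- ===== VERDICT (by name: the statement is the Claim_ definition above) =====
theorem is_uniform_dict_list_py_spec : Claim_equal_is_uniform_dict_list_py := by
  intro lst _
  unfold Spec_is_uniform_dict_list_py
  match lst with
  | [] => rfl
  | first :: rest =>
      show pvALoop (pvSig first) rest = _
      unfold is_uniform_dict_list_py_alt
      simp only [List.foldl_cons]
      have h0 : pvAddSig [] (pvSig first) = [pvSig first] := by unfold pvAddSig; simp
      rw [h0, pvFold_singleton, pvALoop_eq_all]
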